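-- pv_equiv track=rewrite | github.com/cfedermann/wmt15 | scripts/compute_agreement_scores.py | compute_agreement_scores
-- ===== SOURCE A (Python) =====
-- from collections import defaultdict
-- from itertools import combinations
--
-- def extract_system_ids_from_label(label):
--     """
--     Extracts the two system IDs from the given label.
--     """
--     label_systems = []
--     for separator in ('>', '<', '='):
--         if separator in label:
--             label_systems = label.split(separator)
--             break
--     label_systems.sort()
--
--     sorted_and_cleaned_label_systems = []
--     for label_system in label_systems:
--         cleaned_label_systems = label_system.split('+')
--         cleaned_label_systems.sort()
--         sorted_and_cleaned_label_systems.append('+'.join(cleaned_label_systems))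
--
--     return sorted_and_cleaned_label_systems
--
-- def compute_agreement_scores(data):
--     """
--     Computes agreement scores for the given data set.
--     """
--     # Make triples accessible by item id.
--     _by_items = defaultdict(list)
--     for _unused_coder_name, item, labels in data:
--         _by_items[item].append(labels) # We only need the labels here.
--
--     try:
--         identical_cnt = 0
--         comparable_cnt = 0
--         ties_cnt = 0
--         ties_total = 0
--
--         for item_labels in _by_items.values():
--             ties_total += len(item_labels)
--
--             for individual_label in item_labels:
--                 if '=' in individual_label:
--                     ties_cnt += 1
--
--             # cfedermann: combinations() throws a ValueError if x does not
--             # contain two or more elements when using Python 2.6;  hence we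
--             # check length of x before using it ;)
--             if len(item_labels) > 1:
--                 for first_label, second_label in combinations(item_labels, 2):
--                     #if first_label == second_label:
--                     #    identical_cnt += 1
--                     #comparable_cnt += 1
--                     #continue
--
--                     first_label_systems = extract_system_ids_from_label(first_label)
--                     second_label_systems = extract_system_ids_from_label(second_label)
--
--                     if set(first_label_systems) == set(second_label_systems):
--                         comparable_cnt += 1
--
--                         if first_label == second_label:
--                             identical_cnt += 1
--
--         return (identical_cnt, comparable_cnt, ties_cnt, ties_total)
--
--     except:
--         from traceback import print_exc
--         print_exc()
-- ===== SOURCE B (Python) =====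
-- def compute_agreement_scores(data):
--     """
--     Computes agreement scores for the given data set.
--
--     One-pass re-implementation: instead of grouping labels per item and
--     comparing all O(k^2) pairs, keep hash counters of (item, canonical
--     system-id-set) and (item, label) and add, for each entry, the number of
--     earlier matching entries.
--     """
--     def canonical_key(label):
--         parts = None
--         for separator in ('>', '<', '='):
--             if separator in label:
--                 parts = label.split(separator)
--                 break
--         if parts is None:
--             return ()
--         return tuple(sorted({'+'.join(sorted(p.split('+'))) for p in parts}))
--
--     seen_keys = {}
--     seen_labels = {}
--     identical_cnt = 0
--     comparable_cnt = 0
--     ties_cnt = 0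
--     for _unused_coder_name, item, labels in data:
--         if '=' in labels:
--             ties_cnt += 1
--         key = (item, canonical_key(labels))
--         earlier = seen_keys.get(key, 0)
--         comparable_cnt += earlier
--         seen_keys[key] = earlier + 1
--         label_key = (item, labels)
--         earlier_same = seen_labels.get(label_key, 0)
--         identical_cnt += earlier_same
--         seen_labels[label_key] = earlier_same + 1
--     return (identical_cnt, comparable_cnt, ties_cnt, len(data))
-- ===== Notes on version B (the rewrite author's own statement) =====
-- stated objective: faster
-- what changed: Replaces the per-item all-pairs itertools.combinations scan (and the two-phase group-then-compare structure) by a single pass that keeps hash counters keyed by (item, canonical system-id-set) and (item, label) and adds, per entry, the number of earlier matching entries.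
import Mathlib
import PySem

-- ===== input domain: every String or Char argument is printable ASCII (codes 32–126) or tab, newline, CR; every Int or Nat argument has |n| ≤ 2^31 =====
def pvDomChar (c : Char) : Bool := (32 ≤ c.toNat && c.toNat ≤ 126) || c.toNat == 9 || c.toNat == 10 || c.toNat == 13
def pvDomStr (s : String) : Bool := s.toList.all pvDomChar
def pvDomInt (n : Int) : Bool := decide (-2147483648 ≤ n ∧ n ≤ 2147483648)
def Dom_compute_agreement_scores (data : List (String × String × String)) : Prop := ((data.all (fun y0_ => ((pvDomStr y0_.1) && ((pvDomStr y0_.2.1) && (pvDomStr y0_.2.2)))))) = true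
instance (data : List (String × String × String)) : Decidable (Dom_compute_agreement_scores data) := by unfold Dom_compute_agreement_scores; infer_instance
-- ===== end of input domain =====

-- B replaces A's per-item all-pairs combinations scan by one pass over the data
-- with counters keyed by (item, canonical system-id-set) and (item, label).


-- ===== PORT A =====
-- s.split(sep) with a non-empty literal sep (split? is none only for sep = "")
def pySplit (s sep : String) : List String := (PySem.Str.split? s sep).getD []

def extract_system_ids_from_label (label : String) : List String :=
  -- for separator in ('>', '<', '='): if separator in label: split; break
  let label_systems : List String :=
    if PySem.Str.isIn ">" label then pySplit label ">"
    else if PySem.Str.isIn "<" label then pySplit label "<"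
    else if PySem.Str.isIn "=" label then pySplit label "="
    else []
  let label_systems := PySem.List.sorted label_systems (fun x => x) false
  label_systems.foldl (fun acc label_system =>
    acc ++ [PySem.Str.join "+" (PySem.List.sorted (pySplit label_system "+") (fun x => x) false)]) []

def compute_agreement_scores (data : List (String × String × String)) : Int × Int × Int × Int :=
  let by_items : PySem.Dict String (List String) :=
    data.foldl (fun d e => d.modify e.2.1 [] (· ++ [e.2.2])) PySem.Dict.empty
  by_items.values.foldl (fun st item_labels =>
    let ties_total := st.2.2.2 + (item_labels.length : Int)
    let ties_cnt := item_labels.foldl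
      (fun c l => if PySem.Str.isIn "=" l then c + 1 else c) st.2.2.1
    let ic : Int × Int :=
      if item_labels.length > 1 then
        (PySem.List.combinations item_labels 2).foldl (fun p c =>
          match c with
          | [first_label, second_label] =>
            let first_label_systems := extract_system_ids_from_label first_label
            let second_label_systems := extract_system_ids_from_label second_label
            if PySem.Set.equal (PySem.Set.ofList first_label_systems)
                (PySem.Set.ofList second_label_systems) then
              (if first_label == second_label then p.1 + 1 else p.1, p.2 + 1)
            else p
          | _ => p) (st.1, st.2.1)
      else (st.1, st.2.1)
    (ic.1, ic.2, ties_cnt, ties_total)) ((0 : Int), (0 : Int), (0 : Int), (0 : Int))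

-- ===== PORT B =====
def canonical_key (label : String) : List String :=
  let parts? : Option (List String) :=
    if PySem.Str.isIn ">" label then some (pySplit label ">")
    else if PySem.Str.isIn "<" label then some (pySplit label "<")
    else if PySem.Str.isIn "=" label then some (pySplit label "=")
    else none
  match parts? with
  | none => []
  | some parts =>
    PySem.List.sorted
      (PySem.Set.ofList (parts.map (fun p =>
        PySem.Str.join "+" (PySem.List.sorted (pySplit p "+") (fun x => x) false))))
      (fun x => x) false

def compute_agreement_scores_alt (data : List (String × String × String)) : Int × Int × Int × Int :=
  let st :=
    data.foldl (fun st e =>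
      let ties_cnt := if PySem.Str.isIn "=" e.2.2 then st.2.2.2.2 + 1 else st.2.2.2.2
      let key := (e.2.1, canonical_key e.2.2)
      let earlier := st.1.getD key 0
      let comparable_cnt := st.2.2.2.1 + earlier
      let seen_keys := st.1.insert key (earlier + 1)
      let label_key := (e.2.1, e.2.2)
      let earlier_same := st.2.1.getD label_key 0
      let identical_cnt := st.2.2.1 + earlier_same
      let seen_labels := st.2.1.insert label_key (earlier_same + 1)
      (seen_keys, seen_labels, identical_cnt, comparable_cnt, ties_cnt))
      ((PySem.Dict.empty : PySem.Dict (String × List String) Int),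
       (PySem.Dict.empty : PySem.Dict (String × String) Int), (0 : Int), (0 : Int), (0 : Int))
  (st.2.2.1, st.2.2.2.1, st.2.2.2.2, (data.length : Int))

-- ===== PRECONDITION & SPEC =====
def Spec_compute_agreement_scores (data : List (String × String × String)) (out : Int × Int × Int × Int) : Prop := out = compute_agreement_scores_alt data
instance (data : List (String × String × String)) (out : Int × Int × Int × Int) : Decidable (Spec_compute_agreement_scores data out) := by unfold Spec_compute_agreement_scores; infer_instance

-- ===== CLAIM (what is proved, stated in full; the proofs are below) =====
def Claim_equal_compute_agreement_scores : Prop := ∀ (data : List (String × String × String)), Dom_compute_agreement_scores data → Spec_compute_agreement_scores data (compute_agreement_scores data)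

-- ===== LEMMAS AND PROOFS =====

-- ---- generic pair-counting infrastructure ----

/-- All ordered pairs (xs[i], xs[j]) with i < j, in itertools.combinations order. -/
def pvCombos2 {α : Type} (xs : List α) : List (α × α) :=
  match xs with
  | [] => []
  | x :: t => t.map (fun y => (x, y)) ++ pvCombos2 t

/-- Number of unordered index pairs i < j with xs[i] = xs[j]. -/
def pvNp2 {α : Type} [BEq α] (xs : List α) : Nat :=
  (pvCombos2 xs).countP (fun q => q.1 == q.2)

def pvK (e : String × String × String) : String × List String := (e.2.1, canonical_key e.2.2)
def pvL (e : String × String × String) : String × String := (e.2.1, e.2.2)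
def pvTie (e : String × String × String) : Bool := PySem.Str.isIn "=" e.2.2

theorem pvCombos2_countP_snoc {α : Type} (xs : List α) (a : α) (p : α × α → Bool) :
    (pvCombos2 (xs ++ [a])).countP p
      = (pvCombos2 xs).countP p + (xs.map (fun y => (y, a))).countP p := by
  induction xs with
  | nil => simp [pvCombos2]
  | cons x t ih =>
      simp only [List.cons_append, pvCombos2, List.countP_append, ih, List.map_append,
        List.map_cons, List.map_nil, List.countP_cons, List.countP_nil]
      omega

theorem pvCombos2_map {α β : Type} (f : α → β) (xs : List α) :
    pvCombos2 (xs.map f) = (pvCombos2 xs).map (fun q => (f q.1, f q.2)) := by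
  induction xs with
  | nil => simp [pvCombos2]
  | cons x t ih => simp [pvCombos2, ih]

theorem pvNp2_snoc {α : Type} [BEq α] (xs : List α) (a : α) :
    pvNp2 (xs ++ [a]) = pvNp2 xs + xs.count a := by
  simp [pvNp2, pvCombos2_countP_snoc, List.countP_map, List.count]
  rfl

theorem pvNp2_short {α : Type} [BEq α] (xs : List α) (h : xs.length ≤ 1) : pvNp2 xs = 0 := by
  match xs with
  | [] => rfl
  | [x] => rfl
  | x :: y :: t => simp at h

theorem pvCombinations_two {α : Type} (xs : List α) :
    PySem.List.combinations xs 2 = (pvCombos2 xs).map (fun q => [q.1, q.2]) := by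
  induction xs with
  | nil => simp [PySem.List.combinations_nil_succ, pvCombos2]
  | cons x t ih =>
      simp [PySem.List.combinations_cons_succ, PySem.List.combinations_one, pvCombos2, ih,
        List.map_map]

/-- Sum over a Nodup list where exactly the term at `a` grows by `d`. -/
theorem pvSum_map_add_of_mem {ι : Type} (L : List ι) (f f' : ι → Nat)
    (d : Nat) (a : ι) (hnd : L.Nodup) (ha : a ∈ L) (hfa : f' a = f a + d)
    (hother : ∀ i ∈ L, i ≠ a → f' i = f i) :
    (L.map f').sum = (L.map f).sum + d := by
  revert hnd ha hother
  induction L with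
  | nil => intro _ ha _; simp at ha
  | cons b t ih =>
      intro hnd ha hother
      rcases List.nodup_cons.mp hnd with ⟨hbt, hndt⟩
      by_cases hb : b = a
      · subst hb
        have : t.map f' = t.map f := List.map_congr_left (fun i hi =>
          hother i (List.mem_cons_of_mem _ hi) (fun he => hbt (he ▸ hi)))
        simp only [List.map_cons, List.sum_cons, this, hfa]
        omega
      · have hba : b ≠ a := hb
        have ha' : a ∈ t := by rcases List.mem_cons.mp ha with h | h; exact absurd h.symm hba; exact h
        have hfb : f' b = f b := hother b (List.mem_cons_self) hba
        have hih := ih hndt ha' (fun i hi hne => hother i (List.mem_cons_of_mem _ hi) hne)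
        simp only [List.map_cons, List.sum_cons, hfb, hih]
        omega

theorem pvSum_map_congr_append {ι : Type} (L : List ι) (f f' : ι → Nat) (a : ι)
    (hother : ∀ i ∈ L, i ≠ a → f' i = f i) (hnotin : a ∉ L) :
    ((L ++ [a]).map f').sum = (L.map f).sum + f' a := by
  have : L.map f' = L.map f := List.map_congr_left (fun i hi =>
    hother i hi (fun he => hnotin (he ▸ hi)))
  simp [this]

theorem pvDedup_snoc {α : Type} [BEq α] [LawfulBEq α] (l : List α) (a : α) :
    PySem.List.dedup (l ++ [a]) =
      if a ∈ l then PySem.List.dedup l else PySem.List.dedup l ++ [a] := by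
  simp only [PySem.List.dedup_eq_ofList, PySem.Set.ofList_eq_foldl, List.foldl_append,
    List.foldl_cons, List.foldl_nil]
  rw [← PySem.Set.ofList_eq_foldl]
  show PySem.Set.add _ _ = _
  unfold PySem.Set.add
  by_cases hm : a ∈ l
  · simp [PySem.Set.contains_eq_listContains, PySem.Set.mem_ofList, hm]
  · simp [hm, PySem.Set.contains_eq_listContains, PySem.Set.mem_ofList]

-- ---- grouping lemmas: a per-group quantity summed over the first-occurrence
-- ---- dedup of the keys equals one global quantity ----

theorem pvGroup_countP {ι κ : Type} [BEq ι] [LawfulBEq ι] (ps : List (ι × κ))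
    (q : κ → Bool) :
    ((PySem.List.dedup (ps.map Prod.fst)).map
      (fun i => ((ps.filter (fun e => e.1 == i)).map Prod.snd).countP q)).sum
      = ps.countP (fun e => q e.2) := by
  induction ps using List.reverseRecOn with
  | nil => simp [PySem.List.dedup]
  | append_singleton l x ih =>
      have hfilter : ∀ i : ι, (l ++ [x]).filter (fun e => e.1 == i)
          = l.filter (fun e => e.1 == i) ++ (if x.1 == i then [x] else []) := by
        intro i
        rw [List.filter_append]
        by_cases h : x.1 == i <;> simp [h]
      have hF' : ∀ i : ι, (((l ++ [x]).filter (fun e => e.1 == i)).map Prod.snd).countP q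
          = ((l.filter (fun e => e.1 == i)).map Prod.snd).countP q
            + (if x.1 == i then (if q x.2 then 1 else 0) else 0) := by
        intro i
        rw [hfilter]
        cases h : (x.1 == i)
        · simp
        · simp [List.countP_append, List.countP_cons]
      have hother : ∀ i ∈ PySem.List.dedup (l.map Prod.fst), i ≠ x.1 →
          (fun i => (((l ++ [x]).filter (fun e => e.1 == i)).map Prod.snd).countP q) i
            = (fun i => ((l.filter (fun e => e.1 == i)).map Prod.snd).countP q) i := by
        intro i _ hne
        have hb : (x.1 == i) = false := beq_eq_false_iff_ne.mpr (fun he => hne (he ▸ rfl))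
        simp only [hF' i, hb]
        simp
      rw [List.map_append, List.map_singleton, pvDedup_snoc, List.countP_append,
        List.countP_cons, List.countP_nil]
      by_cases hmem : x.1 ∈ l.map Prod.fst
      · rw [if_pos hmem]
        have key := pvSum_map_add_of_mem (PySem.List.dedup (l.map Prod.fst))
          (fun i => ((l.filter (fun e => e.1 == i)).map Prod.snd).countP q)
          (fun i => (((l ++ [x]).filter (fun e => e.1 == i)).map Prod.snd).countP q)
          (if q x.2 then 1 else 0) x.1
          (PySem.List.nodup_dedup _) ((PySem.List.mem_dedup _ _).mpr hmem)
          (by simp only [hF' x.1, BEq.refl, if_true])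
          hother
        rw [key, ih]
        omega
      · rw [if_neg hmem]
        have hnil : l.filter (fun e => e.1 == x.1) = [] := by
          apply List.filter_eq_nil_iff.mpr
          intro e he hbeq
          exact hmem (List.mem_map.mpr ⟨e, he, eq_of_beq hbeq⟩)
        have key := pvSum_map_congr_append (PySem.List.dedup (l.map Prod.fst))
          (fun i => ((l.filter (fun e => e.1 == i)).map Prod.snd).countP q)
          (fun i => (((l ++ [x]).filter (fun e => e.1 == i)).map Prod.snd).countP q)
          x.1 hother (fun hc => hmem ((PySem.List.mem_dedup _ _).mp hc))
        rw [key, ih]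
        simp only [hF' x.1, BEq.refl, if_true, hnil, List.map_nil, List.countP_nil]

theorem pvGroup_np2 {ι κ : Type} [BEq ι] [LawfulBEq ι] [BEq κ] [LawfulBEq κ]
    (ps : List (ι × κ)) :
    ((PySem.List.dedup (ps.map Prod.fst)).map
      (fun i => pvNp2 ((ps.filter (fun e => e.1 == i)).map Prod.snd))).sum
      = pvNp2 ps := by
  induction ps using List.reverseRecOn with
  | nil => simp [PySem.List.dedup, pvNp2, pvCombos2]
  | append_singleton l x ih =>
      have hfilter : ∀ i : ι, (l ++ [x]).filter (fun e => e.1 == i)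
          = l.filter (fun e => e.1 == i) ++ (if x.1 == i then [x] else []) := by
        intro i
        rw [List.filter_append]
        by_cases h : x.1 == i <;> simp [h]
      have hcnt : ((l.filter (fun e => e.1 == x.1)).map Prod.snd).count x.2 = l.count x := by
        simp only [List.count, List.countP_map, List.countP_filter]
        apply List.countP_congr
        intro e _
        simp only [Function.comp_apply, Bool.and_eq_true, beq_iff_eq, Prod.ext_iff]
        tauto
      have hF' : ∀ i : ι, pvNp2 (((l ++ [x]).filter (fun e => e.1 == i)).map Prod.snd)
          = pvNp2 ((l.filter (fun e => e.1 == i)).map Prod.snd)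
            + (if x.1 == i then l.count x else 0) := by
        intro i
        rw [hfilter]
        cases h : (x.1 == i)
        · simp
        · have hi : x.1 = i := eq_of_beq h
          subst hi
          simp only [if_true, List.map_append, List.map_singleton, pvNp2_snoc, hcnt]
      have hother : ∀ i ∈ PySem.List.dedup (l.map Prod.fst), i ≠ x.1 →
          (fun i => pvNp2 (((l ++ [x]).filter (fun e => e.1 == i)).map Prod.snd)) i
            = (fun i => pvNp2 ((l.filter (fun e => e.1 == i)).map Prod.snd)) i := by
        intro i _ hne
        have hb : (x.1 == i) = false := beq_eq_false_iff_ne.mpr (fun he => hne (he ▸ rfl))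
        simp only [hF' i, hb]
        simp
      rw [List.map_append, List.map_singleton, pvDedup_snoc, pvNp2_snoc]
      by_cases hmem : x.1 ∈ l.map Prod.fst
      · rw [if_pos hmem]
        have key := pvSum_map_add_of_mem (PySem.List.dedup (l.map Prod.fst))
          (fun i => pvNp2 ((l.filter (fun e => e.1 == i)).map Prod.snd))
          (fun i => pvNp2 (((l ++ [x]).filter (fun e => e.1 == i)).map Prod.snd))
          (l.count x) x.1
          (PySem.List.nodup_dedup _) ((PySem.List.mem_dedup _ _).mpr hmem)
          (by simp only [hF' x.1, BEq.refl, if_true])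
          hother
        rw [key, ih]
      · rw [if_neg hmem]
        have hnil : l.filter (fun e => e.1 == x.1) = [] := by
          apply List.filter_eq_nil_iff.mpr
          intro e he hbeq
          exact hmem (List.mem_map.mpr ⟨e, he, eq_of_beq hbeq⟩)
        have hcx : l.count x = 0 := by
          apply List.count_eq_zero.mpr
          intro hx
          exact hmem (List.mem_map.mpr ⟨x, hx, rfl⟩)
        have key := pvSum_map_congr_append (PySem.List.dedup (l.map Prod.fst))
          (fun i => pvNp2 ((l.filter (fun e => e.1 == i)).map Prod.snd))
          (fun i => pvNp2 (((l ++ [x]).filter (fun e => e.1 == i)).map Prod.snd))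
          x.1 hother (fun hc => hmem ((PySem.List.mem_dedup _ _).mp hc))
        rw [key, ih]
        simp only [hF' x.1, BEq.refl, if_true, hnil, List.map_nil, hcx]
        simp [pvNp2, pvCombos2]

-- ---- the canonical key names A's set comparison ----

theorem pvSortedOfList_congr (xs ys : List String)
    (h : ∀ a, a ∈ xs ↔ a ∈ ys) :
    PySem.List.sorted (PySem.Set.ofList xs) (fun x => x) false
      = PySem.List.sorted (PySem.Set.ofList ys) (fun x => x) false := by
  apply PySem.List.sorted_eq_sorted_of_perm _ _ _ (fun a b hab => hab)
  apply (List.perm_ext_iff_of_nodup (PySem.Set.nodup_ofList _) (PySem.Set.nodup_ofList _)).mpr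
  intro a
  rw [PySem.Set.mem_ofList, PySem.Set.mem_ofList]
  exact h a

theorem pvCanon_eq_sorted (l : String) :
    canonical_key l =
      PySem.List.sorted (PySem.Set.ofList (extract_system_ids_from_label l)) (fun x => x) false := by
  unfold canonical_key extract_system_ids_from_label
  by_cases h1 : PySem.Str.isIn ">" l <;> by_cases h2 : PySem.Str.isIn "<" l <;>
    by_cases h3 : PySem.Str.isIn "=" l <;>
      simp only [h1, h2, h3, if_true, if_false, Bool.false_eq_true] <;>
      first
        | rfl
        | (rw [PySem.List.foldl_append_singleton_eq_map, List.nil_append]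
           apply pvSortedOfList_congr
           intro a
           constructor
           · intro ha
             rcases List.mem_map.mp ha with ⟨b, hb, hba⟩
             exact List.mem_map.mpr ⟨b, (PySem.List.mem_sorted _ _ _ _).mpr hb, hba⟩
           · intro ha
             rcases List.mem_map.mp ha with ⟨b, hb, hba⟩
             exact List.mem_map.mpr ⟨b, (PySem.List.mem_sorted _ _ _ _).mp hb, hba⟩)

theorem pvEqk_eq_canon (f s : String) :
    PySem.Set.equal (PySem.Set.ofList (extract_system_ids_from_label f))
        (PySem.Set.ofList (extract_system_ids_from_label s))
      = decide (canonical_key f = canonical_key s) := by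
  rw [Bool.eq_iff_iff, PySem.Set.equal_iff, decide_eq_true_iff, pvCanon_eq_sorted,
    pvCanon_eq_sorted]
  constructor
  · intro h
    exact pvSortedOfList_congr _ _ (fun a =>
      (PySem.Set.mem_ofList _ a).symm.trans ((h a).trans (PySem.Set.mem_ofList _ a)))
  · intro h x
    have h1 := (PySem.List.mem_sorted (PySem.Set.ofList (extract_system_ids_from_label f))
      (fun x => x) false x).symm
    have h2 := PySem.List.mem_sorted (PySem.Set.ofList (extract_system_ids_from_label s))
      (fun x => x) false x
    rw [h] at h1
    exact h1.trans h2

-- ---- evaluation of the two ports ----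

theorem pvFold2 (qs : List (String × String)) (i c : Int) :
    qs.foldl (fun p q =>
        if PySem.Set.equal (PySem.Set.ofList (extract_system_ids_from_label q.1))
            (PySem.Set.ofList (extract_system_ids_from_label q.2)) = true then
          (if (q.1 == q.2) = true then p.1 + 1 else p.1, p.2 + 1)
        else p) (i, c)
      = (i + ((qs.countP (fun q => q.1 == q.2) : Nat) : Int),
         c + ((qs.countP (fun q => canonical_key q.1 == canonical_key q.2) : Nat) : Int)) := by
  induction qs generalizing i c with
  | nil => simp
  | cons q rest ih =>
      have hc : PySem.Set.equal (PySem.Set.ofList (extract_system_ids_from_label q.1))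
          (PySem.Set.ofList (extract_system_ids_from_label q.2))
          = (canonical_key q.1 == canonical_key q.2) := by
        rw [pvEqk_eq_canon]
        apply Bool.eq_iff_iff.mpr
        simp [beq_iff_eq]
      rw [List.foldl_cons]
      by_cases h2 : (q.1 == q.2) = true
      · have hq : q.1 = q.2 := eq_of_beq h2
        have h1 : (canonical_key q.1 == canonical_key q.2) = true := by
          rw [hq]
          exact BEq.refl _
        rw [hc] at *
        simp only [h1, h2, if_true, List.countP_cons, ih]
        simp only [Prod.mk.injEq]
        constructor <;> (push_cast; ring)
      · by_cases h1 : (canonical_key q.1 == canonical_key q.2) = true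
        · rw [hc] at *
          simp only [h1, h2, if_true, Bool.false_eq_true, if_false, List.countP_cons, ih]
          simp only [Prod.mk.injEq]
          constructor <;> (push_cast; ring)
        · rw [hc] at *
          simp only [h1, h2, Bool.false_eq_true, if_false, List.countP_cons, ih]
          simp only [Prod.mk.injEq]
          constructor <;> (push_cast; ring)

theorem pvGroupStep (g : List String) (i c : Int) :
    (if g.length > 1 then
        (PySem.List.combinations g 2).foldl (fun p c =>
          match c with
          | [first_label, second_label] =>
            if PySem.Set.equal (PySem.Set.ofList (extract_system_ids_from_label first_label))
                (PySem.Set.ofList (extract_system_ids_from_label second_label)) = true then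
              (if (first_label == second_label) = true then p.1 + 1 else p.1, p.2 + 1)
            else p
          | _ => p) (i, c)
      else (i, c))
      = (i + ((pvNp2 g : Nat) : Int), c + ((pvNp2 (g.map canonical_key) : Nat) : Int)) := by
  have hnp : pvNp2 (g.map canonical_key)
      = (pvCombos2 g).countP (fun q => canonical_key q.1 == canonical_key q.2) := by
    rw [pvNp2, pvCombos2_map, List.countP_map]
    rfl
  by_cases hg : g.length > 1
  · rw [if_pos hg, pvCombinations_two, List.foldl_map]
    have := pvFold2 (pvCombos2 g) i c
    rw [pvNp2, hnp]
    exact this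
  · rw [if_neg hg]
    have h1 : pvNp2 g = 0 := pvNp2_short g (by omega)
    have h2 : pvNp2 (g.map canonical_key) = 0 := pvNp2_short _ (by rw [List.length_map]; omega)
    simp [h1, h2]

theorem pvOuter (gs : List (List String)) (i c t tt : Int) :
    gs.foldl (fun (st : Int × Int × Int × Int) item_labels =>
        ((if item_labels.length > 1 then
              List.foldl
                (fun p c =>
                  match c with
                  | [first_label, second_label] =>
                    if PySem.Set.equal (PySem.Set.ofList (extract_system_ids_from_label first_label))
                        (PySem.Set.ofList (extract_system_ids_from_label second_label)) = true then
                      (if (first_label == second_label) = true then p.1 + 1 else p.1, p.2 + 1)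
                    else p
                  | _ => p)
                (st.1, st.2.1) (PySem.List.combinations item_labels 2)
            else (st.1, st.2.1)).1,
          (if item_labels.length > 1 then
              List.foldl
                (fun p c =>
                  match c with
                  | [first_label, second_label] =>
                    if PySem.Set.equal (PySem.Set.ofList (extract_system_ids_from_label first_label))
                        (PySem.Set.ofList (extract_system_ids_from_label second_label)) = true then
                      (if (first_label == second_label) = true then p.1 + 1 else p.1, p.2 + 1)
                    else p
                  | _ => p)
                (st.1, st.2.1) (PySem.List.combinations item_labels 2)
            else (st.1, st.2.1)).2,
          List.foldl (fun c l => if PySem.Str.isIn "=" l = true then c + 1 else c) st.2.2.1 item_labels,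
          st.2.2.2 + (item_labels.length : Int))) (i, c, t, tt)
      = (i + (((gs.map (fun g => pvNp2 g)).sum : Nat) : Int),
         c + (((gs.map (fun g => pvNp2 (g.map canonical_key))).sum : Nat) : Int),
         t + (((gs.map (fun g => g.countP (fun l => PySem.Str.isIn "=" l))).sum : Nat) : Int),
         tt + (((gs.map List.length).sum : Nat) : Int)) := by
  induction gs generalizing i c t tt with
  | nil => simp
  | cons g rest ih =>
      rw [List.foldl_cons]
      have hpair := pvGroupStep g i c
      rw [hpair, PySem.List.foldl_if_add_one, ih]
      simp only [List.map_cons, List.sum_cons, Prod.mk.injEq]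
      refine ⟨?_, ?_, ?_, ?_⟩ <;> (push_cast; ring)

theorem pvValues (data : List (String × String × String)) :
    (data.foldl (fun d e => d.modify e.2.1 [] fun x => x ++ [e.2.2]) PySem.Dict.empty).values
      = (PySem.List.dedup ((data.map pvL).map Prod.fst)).map
          (fun it => ((data.map pvL).filter (fun e => e.1 == it)).map Prod.snd) := by
  have hfold : data.foldl (fun d e => d.modify e.2.1 [] fun x => x ++ [e.2.2]) PySem.Dict.empty
      = (data.map pvL).foldl (fun d p => d.modify p.1 [] fun x => x ++ [p.2]) PySem.Dict.empty := by
    rw [List.foldl_map]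
    rfl
  rw [hfold]
  have hnd : ((data.map pvL).foldl (fun d p => d.modify p.1 [] fun x => x ++ [p.2])
      PySem.Dict.empty).keys.Nodup := by
    apply PySem.Dict.nodup_keys_foldl_modify_key (key := Prod.fst)
      (f := fun _ p => fun x => x ++ [p.2])
    simp
  rw [PySem.Dict.values_eq_map_keys _ hnd []]
  rw [PySem.Dict.keys_foldl_modify_key (key := Prod.fst) (f := fun _ p => fun x => x ++ [p.2]),
    PySem.Dict.keys_empty, PySem.Set.update_nil_left, ← PySem.List.dedup_eq_ofList]
  apply List.map_congr_left
  intro it _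
  rw [PySem.Dict.getD_foldl_modify_append]
  simp

theorem pvA_eval (data : List (String × String × String)) :
    compute_agreement_scores data =
      ((pvNp2 (data.map pvL) : Int), (pvNp2 (data.map pvK) : Int),
       (data.countP pvTie : Int), (data.length : Int)) := by
  simp only [compute_agreement_scores]
  rw [pvValues, pvOuter]
  have hfst : (data.map pvL).map Prod.fst = (data.map pvK).map Prod.fst := by
    simp only [List.map_map]
    rfl
  have hgrp : ∀ it : String,
      (((data.map pvL).filter (fun e => e.1 == it)).map Prod.snd).map canonical_key
        = ((data.map pvK).filter (fun e => e.1 == it)).map Prod.snd := by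
    intro it
    simp only [List.filter_map, List.map_map]
    rfl
  simp only [Prod.mk.injEq]
  refine ⟨?_, ?_, ?_, ?_⟩
  · rw [List.map_map]
    have := pvGroup_np2 (data.map pvL)
    rw [show ((PySem.List.dedup ((data.map pvL).map Prod.fst)).map
        ((fun g => pvNp2 g) ∘ fun it => ((data.map pvL).filter (fun e => e.1 == it)).map Prod.snd))
        = ((PySem.List.dedup ((data.map pvL).map Prod.fst)).map
          (fun i => pvNp2 (((data.map pvL).filter (fun e => e.1 == i)).map Prod.snd))) from rfl,
      this]
    ring
  · rw [List.map_map]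
    have := pvGroup_np2 (data.map pvK)
    rw [show ((PySem.List.dedup ((data.map pvL).map Prod.fst)).map
        ((fun g => pvNp2 (g.map canonical_key))
          ∘ fun it => ((data.map pvL).filter (fun e => e.1 == it)).map Prod.snd))
        = ((PySem.List.dedup ((data.map pvL).map Prod.fst)).map
          (fun i => pvNp2 ((((data.map pvL).filter (fun e => e.1 == i)).map Prod.snd).map
            canonical_key))) from rfl]
    rw [List.map_congr_left (fun i _ => congrArg pvNp2 (hgrp i)), hfst, this]
    ring
  · rw [List.map_map]
    have := pvGroup_countP (data.map pvL) (fun l => PySem.Str.isIn "=" l)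
    rw [show ((PySem.List.dedup ((data.map pvL).map Prod.fst)).map
        ((fun g => g.countP (fun l => PySem.Str.isIn "=" l))
          ∘ fun it => ((data.map pvL).filter (fun e => e.1 == it)).map Prod.snd))
        = ((PySem.List.dedup ((data.map pvL).map Prod.fst)).map
          (fun i => (((data.map pvL).filter (fun e => e.1 == i)).map Prod.snd).countP
            (fun l => PySem.Str.isIn "=" l))) from rfl,
      this, List.countP_map]
    have : data.countP ((fun e => PySem.Str.isIn "=" e.2) ∘ pvL) = data.countP pvTie := rfl
    rw [this]
    ring
  · rw [List.map_map]
    have hlen : ((fun g : List String => g.length)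
        ∘ fun it => ((data.map pvL).filter (fun e => e.1 == it)).map Prod.snd)
        = fun it => (((data.map pvL).filter (fun e => e.1 == it)).map Prod.snd).countP
            (fun _ => true) := by
      funext it
      simp [List.countP_true]
    rw [show (PySem.List.dedup ((data.map pvL).map Prod.fst)).map (List.length
        ∘ fun it => ((data.map pvL).filter (fun e => e.1 == it)).map Prod.snd)
        = (PySem.List.dedup ((data.map pvL).map Prod.fst)).map ((fun g : List String => g.length)
        ∘ fun it => ((data.map pvL).filter (fun e => e.1 == it)).map Prod.snd) from rfl,
      hlen, pvGroup_countP (data.map pvL) (fun _ => true)]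
    simp

theorem pvCounter_snoc {κ : Type} [BEq κ] (ks : List κ) (k : κ) :
    PySem.Dict.counter (ks ++ [k])
      = (PySem.Dict.counter ks).insert k ((PySem.Dict.counter ks).getD k 0 + 1) := by
  rw [← PySem.Dict.foldl_insert_getD_add_one_eq_counter, List.foldl_append, List.foldl_cons,
    List.foldl_nil, PySem.Dict.foldl_insert_getD_add_one_eq_counter]

theorem pvB_fold (l p : List (String × String × String)) :
    l.foldl (fun st e =>
        (st.1.insert (e.2.1, canonical_key e.2.2) (st.1.getD (e.2.1, canonical_key e.2.2) 0 + 1),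
          st.2.1.insert (e.2.1, e.2.2) (st.2.1.getD (e.2.1, e.2.2) 0 + 1),
          st.2.2.1 + st.2.1.getD (e.2.1, e.2.2) 0,
          st.2.2.2.1 + st.1.getD (e.2.1, canonical_key e.2.2) 0,
          if PySem.Str.isIn "=" e.2.2 = true then st.2.2.2.2 + 1 else st.2.2.2.2))
      (PySem.Dict.counter (p.map pvK), PySem.Dict.counter (p.map pvL),
        ((pvNp2 (p.map pvL) : Nat) : Int), ((pvNp2 (p.map pvK) : Nat) : Int),
        ((p.countP pvTie : Nat) : Int))
    = (PySem.Dict.counter ((p ++ l).map pvK), PySem.Dict.counter ((p ++ l).map pvL),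
        ((pvNp2 ((p ++ l).map pvL) : Nat) : Int), ((pvNp2 ((p ++ l).map pvK) : Nat) : Int),
        (((p ++ l).countP pvTie : Nat) : Int)) := by
  induction l generalizing p with
  | nil => simp
  | cons x t ih =>
      rw [List.foldl_cons]
      have hstep :
          ((PySem.Dict.counter (p.map pvK)).insert (x.2.1, canonical_key x.2.2)
              ((PySem.Dict.counter (p.map pvK)).getD (x.2.1, canonical_key x.2.2) 0 + 1),
            (PySem.Dict.counter (p.map pvL)).insert (x.2.1, x.2.2)
              ((PySem.Dict.counter (p.map pvL)).getD (x.2.1, x.2.2) 0 + 1),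
            ((pvNp2 (p.map pvL) : Nat) : Int) + (PySem.Dict.counter (p.map pvL)).getD (x.2.1, x.2.2) 0,
            ((pvNp2 (p.map pvK) : Nat) : Int)
              + (PySem.Dict.counter (p.map pvK)).getD (x.2.1, canonical_key x.2.2) 0,
            if PySem.Str.isIn "=" x.2.2 = true then ((p.countP pvTie : Nat) : Int) + 1
              else ((p.countP pvTie : Nat) : Int))
          = (PySem.Dict.counter ((p ++ [x]).map pvK), PySem.Dict.counter ((p ++ [x]).map pvL),
              ((pvNp2 ((p ++ [x]).map pvL) : Nat) : Int),
              ((pvNp2 ((p ++ [x]).map pvK) : Nat) : Int),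
              (((p ++ [x]).countP pvTie : Nat) : Int)) := by
        have hK : (p ++ [x]).map pvK = p.map pvK ++ [pvK x] := by simp
        have hL : (p ++ [x]).map pvL = p.map pvL ++ [pvL x] := by simp
        simp only [Prod.mk.injEq]
        refine ⟨?_, ?_, ?_, ?_, ?_⟩
        · rw [hK, pvCounter_snoc]
          rfl
        · rw [hL, pvCounter_snoc]
          rfl
        · rw [show ((x.2.1, x.2.2) : String × String) = pvL x from rfl, hL, pvNp2_snoc,
            PySem.Dict.getD_counter]
          push_cast
          ring
        · rw [show ((x.2.1, canonical_key x.2.2) : String × List String) = pvK x from rfl, hK,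
            pvNp2_snoc, PySem.Dict.getD_counter]
          push_cast
          ring
        · rw [List.countP_append]
          have hx : List.countP pvTie [x] = if PySem.Str.isIn "=" x.2.2 = true then 1 else 0 := by
            simp [List.countP_cons, pvTie]
          rw [hx]
          by_cases h : PySem.Str.isIn "=" x.2.2 = true
          · rw [if_pos h, if_pos h]
            push_cast
            ring
          · rw [if_neg h, if_neg h]
            push_cast
            ring
      rw [hstep, ih (p ++ [x])]
      simp

theorem pvB_eval (data : List (String × String × String)) :
    compute_agreement_scores_alt data =
      ((pvNp2 (data.map pvL) : Int), (pvNp2 (data.map pvK) : Int),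
       (data.countP pvTie : Int), (data.length : Int)) := by
  simp only [compute_agreement_scores_alt]
  have h := pvB_fold data []
  simp only [List.nil_append] at h
  have h0 : (PySem.Dict.counter (([] : List (String × String × String)).map pvK),
      PySem.Dict.counter (([] : List (String × String × String)).map pvL),
      ((pvNp2 (([] : List (String × String × String)).map pvL) : Nat) : Int),
      ((pvNp2 (([] : List (String × String × String)).map pvK) : Nat) : Int),
      (((([] : List (String × String × String)).countP pvTie) : Nat) : Int))
      = ((PySem.Dict.empty : PySem.Dict (String × List String) Int),
         (PySem.Dict.empty : PySem.Dict (String × String) Int), (0 : Int), (0 : Int), (0 : Int)) := by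
    rfl
  rw [h0] at h
  rw [h]

-- ===== VERDICT (by name: the statement is the Claim_ definition above) =====
theorem compute_agreement_scores_spec : Claim_equal_compute_agreement_scores := by
  intro data _
  show compute_agreement_scores data = compute_agreement_scores_alt data
  rw [pvA_eval, pvB_eval]
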